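-- pv_equiv track=rewrite | github.com/satoshun-example/coder | topcoder/ANewHope.py | count
-- ===== SOURCE A (Python) =====
-- import math
--
-- def count(firstWeek, lastWeek, D):
--     if firstWeek == lastWeek:
--         return 1
--
--     m = 0
--     for i, e in enumerate(firstWeek):
--         for j, e2 in enumerate(lastWeek):
--             if e == e2:
--                 mm = i - j
--                 if mm > m:
--                     m = mm
--                     break
--     return math.ceil(m / (len(firstWeek) - D)) + 1
-- ===== SOURCE B (Python) =====
-- def count(firstWeek, lastWeek, D):
--     if firstWeek == lastWeek:
--         return 1
--     fw = sorted(((e, i) for i, e in enumerate(firstWeek)), key=lambda t: t[0])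
--     lw = sorted(((e, j) for j, e in enumerate(lastWeek)), key=lambda t: t[0])
--     m = 0
--     p, q = 0, 0
--     n, k = len(fw), len(lw)
--     while p < n and q < k:
--         v, i = fw[p]
--         w, j = lw[q]
--         if v < w:
--             p += 1
--         elif w < v:
--             q += 1
--         else:
--             maxi = i
--             while p < n and fw[p][0] == v:
--                 if fw[p][1] > maxi:
--                     maxi = fw[p][1]
--                 p += 1
--             minj = j
--             while q < k and lw[q][0] == v:
--                 if lw[q][1] < minj:
--                     minj = lw[q][1]
--                 q += 1
--             if maxi - minj > m:
--                 m = maxi - minj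
--     return -(-m // (len(firstWeek) - D)) + 1
-- ===== Notes on version B (the rewrite author's own statement) =====
-- stated objective: faster
-- what changed: Replaced A's nested positional scans by sort-then-merge: both lists are tagged with indices, sorted by value, and one two-pointer merge over the two sorted lists takes per common value (largest firstWeek index) - (smallest lastWeek index); the ceiling is computed with exact integer division instead of float math.ceil.
import Mathlib
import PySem

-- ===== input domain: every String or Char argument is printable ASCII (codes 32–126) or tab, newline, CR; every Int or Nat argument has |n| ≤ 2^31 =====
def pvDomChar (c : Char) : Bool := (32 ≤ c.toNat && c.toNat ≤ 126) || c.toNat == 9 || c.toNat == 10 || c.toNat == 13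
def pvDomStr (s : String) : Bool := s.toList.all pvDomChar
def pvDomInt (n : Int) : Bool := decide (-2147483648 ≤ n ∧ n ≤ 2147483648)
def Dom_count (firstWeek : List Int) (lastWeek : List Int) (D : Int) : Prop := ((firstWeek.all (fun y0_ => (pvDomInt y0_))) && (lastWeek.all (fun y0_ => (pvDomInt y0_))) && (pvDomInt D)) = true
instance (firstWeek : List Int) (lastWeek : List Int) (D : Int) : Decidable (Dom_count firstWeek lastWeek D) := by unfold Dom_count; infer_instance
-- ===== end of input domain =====

-- B replaces A's nested positional scans by sort-then-merge: both lists are tagged with their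
-- indices, sorted by value, and a single two-pointer merge over the two sorted lists takes, per
-- common value, (largest firstWeek index) - (smallest lastWeek index).  O((n+k) log (n+k)) vs O(n*k).
-- math.ceil(m/(len-D)) is ported in BOTH ports as the exact integer ceiling -((-m) // (len-D)); this
-- equals Python's float computation since |m| < len(firstWeek) < 2^52 on any realisable input.

-- ===== PORT A =====
-- inner loop of A: for j, e2 in enumerate(lastWeek): if e == e2: mm = i - j; if mm > m: m = mm; break
def innerA (i m e : Int) : List Int → Int → Int
  | [], _ => m
  | e2 :: rest, j =>
    if e = e2 then (if i - j > m then i - j else innerA i m e rest (j + 1))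
    else innerA i m e rest (j + 1)

-- outer loop of A: for i, e in enumerate(firstWeek)
def outerA (lastWeek : List Int) : List Int → Int → Int → Int
  | [], _, m => m
  | e :: rest, i, m => outerA lastWeek rest (i + 1) (innerA i m e lastWeek 0)

def count (firstWeek : List Int) (lastWeek : List Int) (D : Int) : Int :=
  if firstWeek = lastWeek then 1
  else
    let m := outerA lastWeek firstWeek 0 0;
    -(PySem.Int.floordiv (-m) ((firstWeek.length : Int) - D)) + 1

-- ===== PORT B =====
-- (e, i) for i, e in enumerate(l)
def enumI : Int → List Int → List (Int × Int)
  | _, [] => []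
  | i, e :: rest => (e, i) :: enumI (i + 1) rest

-- while p < n and fw[p][0] == v: if fw[p][1] > maxi: maxi = fw[p][1]; p += 1   (returns final maxi)
def runMax (v : Int) : Int → List (Int × Int) → Int
  | acc, [] => acc
  | acc, t :: rest => if t.1 = v then runMax v (if t.2 > acc then t.2 else acc) rest else acc

-- while q < k and lw[q][0] == v: if lw[q][1] < minj: minj = lw[q][1]; q += 1   (returns final minj)
def runMin (v : Int) : Int → List (Int × Int) → Int
  | acc, [] => acc
  | acc, t :: rest => if t.1 = v then runMin v (if t.2 < acc then t.2 else acc) rest else acc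

-- advancing the pointer past the run of value v
def dropRun (v : Int) (l : List (Int × Int)) : List (Int × Int) := l.dropWhile (fun t => t.1 == v)

-- the outer two-pointer while loop over the two sorted lists
def mergeB : List (Int × Int) → List (Int × Int) → Int → Int
  | [], _, m => m
  | _ :: _, [], m => m
  | (v, i) :: as_, (w, j) :: bs_, m =>
    if v < w then mergeB as_ ((w, j) :: bs_) m
    else if w < v then mergeB ((v, i) :: as_) bs_ m
    else
      let maxi := runMax v i as_;
      let minj := runMin w j bs_;
      mergeB (dropRun v as_) (dropRun w bs_) (if maxi - minj > m then maxi - minj else m)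
termination_by as_ bs_ _ => as_.length + bs_.length
decreasing_by
  · simp
  · simp
  · have h1 := List.length_dropWhile_le (fun t : Int × Int => t.1 == v) as_
    have h2 := List.length_dropWhile_le (fun t : Int × Int => t.1 == w) bs_
    simp only [dropRun, List.length_cons]
    omega

def count_alt (firstWeek : List Int) (lastWeek : List Int) (D : Int) : Int :=
  if firstWeek = lastWeek then 1
  else
    let fw := PySem.List.sorted (enumI 0 firstWeek) (fun t => t.1);
    let lw := PySem.List.sorted (enumI 0 lastWeek) (fun t => t.1);
    let m := mergeB fw lw 0;
    -(PySem.Int.floordiv (-m) ((firstWeek.length : Int) - D)) + 1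

-- ===== PRECONDITION & SPEC =====
-- Pre_ excludes exactly the inputs where A raises ZeroDivisionError (firstWeek ≠ lastWeek and
-- len(firstWeek) = D); B raises the same exception there.
def Pre_count (firstWeek : List Int) (lastWeek : List Int) (D : Int) : Prop :=
  firstWeek = lastWeek ∨ (firstWeek.length : Int) ≠ D

instance (firstWeek : List Int) (lastWeek : List Int) (D : Int) : Decidable (Pre_count firstWeek lastWeek D) := by
  unfold Pre_count; infer_instance

def pvWitness_count : List Int × List Int × Int := ([0, 1], [1, 0], 0)

def Spec_count (firstWeek : List Int) (lastWeek : List Int) (D : Int) (out : Int) : Prop := out = count_alt firstWeek lastWeek D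
instance (firstWeek : List Int) (lastWeek : List Int) (D : Int) (out : Int) : Decidable (Spec_count firstWeek lastWeek D out) := by unfold Spec_count; infer_instance

-- ===== CLAIM (what is proved, stated in full; the proofs are below) =====
def Claim_equal_count : Prop := ∀ (firstWeek : List Int) (lastWeek : List Int) (D : Int), Dom_count firstWeek lastWeek D → Pre_count firstWeek lastWeek D → Spec_count firstWeek lastWeek D (count firstWeek lastWeek D)

-- ===== LEMMAS AND PROOFS =====

-- one matching pair of index-tagged entries contributes a.2 - b.2
def fmatch (a b : Int × Int) : Option Int := if b.1 = a.1 then some (a.2 - b.2) else none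

-- all contributions of all matching pairs: the common value both programs maximise over
def cand (as_ bs_ : List (Int × Int)) : List Int :=
  as_.flatMap (fun a => bs_.filterMap (fmatch a))

theorem enumI_snd_ge {p : Int × Int} : ∀ (l : List Int) (j0 : Int), p ∈ enumI j0 l → j0 ≤ p.2 := by
  intro l
  induction l with
  | nil => intro j0 h; simp [enumI] at h
  | cons x r ih =>
    intro j0 h
    simp only [enumI, List.mem_cons] at h
    rcases h with h | h
    · subst h; simp
    · have := ih (j0 + 1) h; omega

theorem foldl_max_const {a : Int} {l : List Int} (h : ∀ y ∈ l, y ≤ a) : l.foldl max a = a := by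
  have h1 := (PySem.List.le_foldl_max l a).1
  rcases PySem.List.foldl_max_mem l a with he | hm
  · exact he
  · exact le_antisymm (h _ hm) h1

theorem innerA_eq (i e : Int) : ∀ (l : List Int) (m j0 : Int),
    innerA i m e l j0 = List.foldl max m ((enumI j0 l).filterMap (fmatch (e, i))) := by
  intro l
  induction l with
  | nil => intro m j0; simp [innerA, enumI]
  | cons x rest ih =>
    intro m j0
    by_cases he : e = x
    · have hm : fmatch (e, i) (x, j0) = some (i - j0) := by simp [fmatch, he]
      by_cases hc : i - j0 > m
      · have hall : ∀ y ∈ (enumI (j0 + 1) rest).filterMap (fmatch (e, i)), y ≤ i - j0 := by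
          intro y hy
          rcases List.mem_filterMap.mp hy with ⟨b, hb, hfb⟩
          have hge := enumI_snd_ge rest (j0 + 1) hb
          simp only [fmatch] at hfb
          split at hfb
          · cases hfb; omega
          · cases hfb
        calc innerA i m e (x :: rest) j0 = i - j0 := by simp [innerA, he, hc]
          _ = List.foldl max (max m (i - j0)) ((enumI (j0 + 1) rest).filterMap (fmatch (e, i))) := by
              rw [foldl_max_const (fun y hy => le_trans (hall y hy) (le_max_right m (i - j0)))]
              omega
          _ = _ := by simp [enumI, hm]
      · have h1 : innerA i m e (x :: rest) j0 = innerA i m e rest (j0 + 1) := by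
          simp [innerA, he, hc]
        rw [h1, ih m (j0 + 1)]
        have h2 : max m (i - j0) = m := by omega
        simp [enumI, hm, h2]
    · have hm : fmatch (e, i) (x, j0) = none := by
        simp only [fmatch]; split
        · omega
        · rfl
      simp only [innerA, if_neg he, ih m (j0 + 1), enumI, List.filterMap_cons, hm]

theorem outerA_eq (lw : List Int) : ∀ (fw : List Int) (i0 m : Int),
    outerA lw fw i0 m = List.foldl max m (cand (enumI i0 fw) (enumI 0 lw)) := by
  intro fw
  induction fw with
  | nil => intro i0 m; simp [outerA, cand, enumI]
  | cons e r ih =>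
    intro i0 m
    simp only [outerA, ih, cand, enumI, List.flatMap_cons, List.foldl_append, innerA_eq]

-- values of runs and rests (the sortedness facts the merge needs)
theorem run_split (v : Int) : ∀ (l : List (Int × Int)),
    List.Pairwise (fun a b : Int × Int => a.1 ≤ b.1) l → (∀ x ∈ l, v ≤ x.1) →
    (∀ x ∈ l.takeWhile (fun t => t.1 == v), x.1 = v) ∧
    (∀ x ∈ l.dropWhile (fun t => t.1 == v), v < x.1) := by
  intro l
  induction l with
  | nil => intro _ _; constructor <;> intro x hx <;> simp at hx
  | cons a r ih =>
    intro hp hv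
    by_cases ha : a.1 = v
    · have hrec := ih hp.of_cons (fun x hx => hv x (List.mem_cons_of_mem a hx))
      constructor
      · intro x hx
        rw [List.takeWhile_cons_of_pos (by simp [ha])] at hx
        rcases List.mem_cons.mp hx with h | h
        · subst h; exact ha
        · exact hrec.1 x h
      · intro x hx
        rw [List.dropWhile_cons_of_pos (by simp [ha])] at hx
        exact hrec.2 x hx
    · have hlt : v < a.1 := lt_of_le_of_ne (hv a List.mem_cons_self) (fun h => ha h.symm)
      constructor
      · intro x hx
        rw [List.takeWhile_cons_of_neg (by simp [ha])] at hx
        simp at hx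
      · intro x hx
        rw [List.dropWhile_cons_of_neg (by simp [ha])] at hx
        rcases List.mem_cons.mp hx with h | h
        · subst h; exact hlt
        · have := (List.pairwise_cons.mp hp).1 x h; omega

theorem filterMap_fmatch_nil {a : Int × Int} {l : List (Int × Int)}
    (h : ∀ b ∈ l, b.1 ≠ a.1) : l.filterMap (fmatch a) = [] := by
  rw [List.filterMap_eq_nil_iff]
  intro b hb
  simp only [fmatch]
  split
  · exact absurd ‹b.1 = a.1› (h b hb)
  · rfl

theorem filterMap_fmatch_all {a : Int × Int} {l : List (Int × Int)}
    (h : ∀ b ∈ l, b.1 = a.1) : l.filterMap (fmatch a) = l.map (fun b => a.2 - b.2) := by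
  induction l with
  | nil => rfl
  | cons b r ih =>
    have hb : fmatch a b = some (a.2 - b.2) := by simp [fmatch, h b List.mem_cons_self]
    simp only [List.filterMap_cons, hb, List.map_cons]
    rw [ih (fun x hx => h x (List.mem_cons_of_mem b hx))]

theorem cand_skip_right {bs_ rb : List (Int × Int)} : ∀ (as_ : List (Int × Int)),
    (∀ a ∈ as_, ∀ b ∈ bs_, b.1 ≠ a.1) → cand as_ (bs_ ++ rb) = cand as_ rb := by
  intro as_
  induction as_ with
  | nil => intro _; rfl
  | cons a r ih =>
    intro h
    simp only [cand, List.flatMap_cons, List.filterMap_append]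
    rw [filterMap_fmatch_nil (fun b hb => h a List.mem_cons_self b hb)]
    simp only [List.nil_append]
    have := ih (fun a' ha' b hb => h a' (List.mem_cons_of_mem a ha') b hb)
    simp only [cand, List.filterMap_append] at this
    rw [this]

-- run maxima: the inner while loops compute folds over the run
theorem runMax_eq (v : Int) : ∀ (t r : List (Int × Int)) (acc : Int),
    (∀ x ∈ t, x.1 = v) → (∀ x ∈ r, x.1 ≠ v) →
    runMax v acc (t ++ r) = t.foldl (fun a b => max a b.2) acc := by
  intro t
  induction t with
  | nil =>
    intro r acc _ hr
    cases r with
    | nil => rfl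
    | cons b rb => simp [runMax, hr b List.mem_cons_self]
  | cons x tr ih =>
    intro r acc ht hr
    have hx : x.1 = v := ht x List.mem_cons_self
    have : (if x.2 > acc then x.2 else acc) = max acc x.2 := by omega
    simp only [List.cons_append, runMax, if_pos hx, this, List.foldl_cons]
    exact ih r (max acc x.2) (fun y hy => ht y (List.mem_cons_of_mem x hy)) hr

theorem runMin_eq (v : Int) : ∀ (t r : List (Int × Int)) (acc : Int),
    (∀ x ∈ t, x.1 = v) → (∀ x ∈ r, x.1 ≠ v) →
    runMin v acc (t ++ r) = t.foldl (fun a b => min a b.2) acc := by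
  intro t
  induction t with
  | nil =>
    intro r acc _ hr
    cases r with
    | nil => rfl
    | cons b rb => simp [runMin, hr b List.mem_cons_self]
  | cons x tr ih =>
    intro r acc ht hr
    have hx : x.1 = v := ht x List.mem_cons_self
    have : (if x.2 < acc then x.2 else acc) = min acc x.2 := by omega
    simp only [List.cons_append, runMin, if_pos hx, this, List.foldl_cons]
    exact ih r (min acc x.2) (fun y hy => ht y (List.mem_cons_of_mem x hy)) hr

theorem foldl_max_comm : ∀ (t : List Int) (a b : Int), t.foldl max (max a b) = max a (t.foldl max b) := by
  intro t
  induction t with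
  | nil => intro a b; rfl
  | cons x r ih =>
    intro a b
    simp only [List.foldl_cons]
    rw [max_assoc, ih]

theorem row_max (x j m : Int) : ∀ (js : List Int),
    List.foldl max m ((j :: js).map (fun y => x - y)) = max m (x - js.foldl min j) := by
  intro js
  induction js generalizing j m with
  | nil => simp [max_def]
  | cons y t ih =>
    simp only [List.map_cons, List.foldl_cons] at *
    have hacc : max (max m (x - j)) (x - y) = max m (x - min j y) := by omega
    rw [hacc, ih (min j y) m]

theorem maxdiff (i j : Int) : ∀ (is_ : List Int) (m : Int) (js : List Int),
    List.foldl max m ((i :: is_).flatMap (fun x => (j :: js).map (fun y => x - y)))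
      = max m ((is_.foldl max i) - (js.foldl min j)) := by
  intro is_
  induction is_ generalizing i with
  | nil =>
    intro m js
    simp only [List.flatMap_cons, List.flatMap_nil, List.append_nil, List.foldl_nil]
    exact row_max i j m js
  | cons x t ih =>
    intro m js
    simp only [List.flatMap_cons, List.foldl_append] at *
    rw [row_max i j m js, ih x (max m (i - js.foldl min j)) js]
    have hfm : t.foldl max (max i x) = max i (t.foldl max x) := foldl_max_comm t i x
    simp only [List.foldl_cons]
    rw [hfm]
    omega

theorem flatMap_congr_mem {α β : Type} {l : List α} {f g : α → List β}
    (h : ∀ a ∈ l, f a = g a) : l.flatMap f = l.flatMap g := by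
  induction l with
  | nil => rfl
  | cons a r ih =>
    simp only [List.flatMap_cons, h a List.mem_cons_self,
      ih (fun x hx => h x (List.mem_cons_of_mem a hx))]

-- the run decomposition of the candidate list at a common head value
theorem cand_run (v i j : Int) (tA rA tB rB : List (Int × Int))
    (htA : ∀ x ∈ tA, x.1 = v) (hrA : ∀ x ∈ rA, v < x.1)
    (htB : ∀ x ∈ tB, x.1 = v) (hrB : ∀ x ∈ rB, v < x.1) :
    cand ((v, i) :: (tA ++ rA)) ((v, j) :: (tB ++ rB))
      = (i :: tA.map Prod.snd).flatMap
          (fun x => (j :: tB.map Prod.snd).map (fun y => x - y)) ++ cand rA rB := by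
  have hrow : ∀ a : Int × Int, a.1 = v →
      List.filterMap (fmatch a) ((v, j) :: (tB ++ rB))
        = (j :: tB.map Prod.snd).map (fun y => a.2 - y) := by
    intro a hav
    have h1 : (v, j) :: (tB ++ rB) = ((v, j) :: tB) ++ rB := by simp
    rw [h1, List.filterMap_append,
      filterMap_fmatch_nil (l := rB) (fun b hb => by have := hrB b hb; omega),
      List.append_nil,
      filterMap_fmatch_all (l := (v, j) :: tB) (by
        intro b hb
        rcases List.mem_cons.mp hb with h | h
        · subst h; simpa using hav.symm
        · rw [htB b h, hav])]
    simp [List.map_map, Function.comp]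
  have hskip : cand rA ((v, j) :: (tB ++ rB)) = cand rA rB := by
    have h1 : (v, j) :: (tB ++ rB) = ((v, j) :: tB) ++ rB := by simp
    rw [h1]
    apply cand_skip_right
    intro a ha b hb
    have hav : v < a.1 := hrA a ha
    rcases List.mem_cons.mp hb with h | h
    · subst h; simp; omega
    · rw [htB b h]; omega
  simp only [cand] at hskip ⊢
  rw [List.flatMap_cons, List.flatMap_append, hrow (v, i) rfl,
    flatMap_congr_mem (l := tA) (fun a ha => hrow a (htA a ha)), hskip]
  simp [List.flatMap_map, List.append_assoc]

-- main merge lemma: over value-sorted lists the two-pointer merge computes the max of all contributions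
theorem mergeB_eq : ∀ (n : Nat) (as_ bs_ : List (Int × Int)) (m : Int),
    as_.length + bs_.length ≤ n →
    List.Pairwise (fun a b : Int × Int => a.1 ≤ b.1) as_ →
    List.Pairwise (fun a b : Int × Int => a.1 ≤ b.1) bs_ →
    mergeB as_ bs_ m = List.foldl max m (cand as_ bs_) := by
  intro n
  induction n with
  | zero =>
    intro as_ bs_ m hlen _ _
    have hA : as_ = [] := by cases as_ <;> simp_all
    subst hA
    simp [mergeB, cand]
  | succ n ih =>
    intro as_ bs_ m hlen ha hb
    rcases as_ with _ | ⟨⟨v, i⟩, as'⟩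
    · simp [mergeB, cand]
    rcases bs_ with _ | ⟨⟨w, j⟩, bs'⟩
    · simp only [mergeB, cand]
      rw [List.flatMap_eq_nil_iff.mpr (fun _ _ => rfl : ∀ x ∈ (v, i) :: as', List.filterMap (fmatch x) [] = [])]
      rfl
    by_cases hvw : v < w
    · have hskip : List.filterMap (fmatch (v, i)) ((w, j) :: bs') = [] := by
        apply filterMap_fmatch_nil
        intro b hbm
        rcases List.mem_cons.mp hbm with h | h
        · subst h; simp; omega
        · have := (List.pairwise_cons.mp hb).1 b h; simp at this ⊢; omega
      simp only [mergeB, if_pos hvw]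
      rw [ih as' ((w, j) :: bs') m (by simp at hlen ⊢; omega) ha.of_cons hb]
      simp only [cand, List.flatMap_cons, hskip, List.nil_append]
    · by_cases hwv : w < v
      · have hskip : cand ((v, i) :: as') ([(w, j)] ++ bs') = cand ((v, i) :: as') bs' := by
          apply cand_skip_right
          intro a ham b hbm
          simp only [List.mem_singleton] at hbm
          subst hbm
          rcases List.mem_cons.mp ham with h | h
          · subst h; simp; omega
          · have := (List.pairwise_cons.mp ha).1 a h; simp at this ⊢; omega
        simp only [mergeB, if_neg hvw, if_pos hwv]
        rw [ih ((v, i) :: as') bs' m (by simp at hlen ⊢; omega) ha hb.of_cons]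
        rw [← hskip]; rfl
      · have heq : w = v := by omega
        subst heq
        -- run decomposition of both lists
        have hvA : ∀ x ∈ as', w ≤ x.1 := fun x hx => (List.pairwise_cons.mp ha).1 x hx
        have hvB : ∀ x ∈ bs', w ≤ x.1 := fun x hx => (List.pairwise_cons.mp hb).1 x hx
        obtain ⟨htA, hdA⟩ := run_split w as' ha.of_cons hvA
        obtain ⟨htB, hdB⟩ := run_split w bs' hb.of_cons hvB
        have hsplitA := List.takeWhile_append_dropWhile (p := fun t : Int × Int => t.1 == w) (l := as')
        have hsplitB := List.takeWhile_append_dropWhile (p := fun t : Int × Int => t.1 == w) (l := bs')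
        have hneA : ∀ x ∈ as'.dropWhile (fun t => t.1 == w), x.1 ≠ w :=
          fun x hx => by have := hdA x hx; omega
        have hneB : ∀ x ∈ bs'.dropWhile (fun t => t.1 == w), x.1 ≠ w :=
          fun x hx => by have := hdB x hx; omega
        have hMax : runMax w i as' = ((as'.takeWhile (fun t => t.1 == w)).map Prod.snd).foldl max i := by
          conv_lhs => rw [← hsplitA]
          rw [runMax_eq w _ _ i htA hneA, List.foldl_map]
        have hMin : runMin w j bs' = ((bs'.takeWhile (fun t => t.1 == w)).map Prod.snd).foldl min j := by
          conv_lhs => rw [← hsplitB]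
          rw [runMin_eq w _ _ j htB hneB, List.foldl_map]
        have hcand : cand ((w, i) :: as') ((w, j) :: bs')
            = (i :: (as'.takeWhile (fun t => t.1 == w)).map Prod.snd).flatMap
                (fun x => (j :: (bs'.takeWhile (fun t => t.1 == w)).map Prod.snd).map (fun y => x - y))
              ++ cand (dropRun w as') (dropRun w bs') := by
          conv_lhs => rw [← hsplitA, ← hsplitB]
          exact cand_run w i j _ _ _ _ htA hdA htB hdB
        simp only [mergeB, if_neg hvw]
        rw [ih (dropRun w as') (dropRun w bs') _
            (by
              have l1 := List.length_dropWhile_le (fun t : Int × Int => t.1 == w) as'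
              have l2 := List.length_dropWhile_le (fun t : Int × Int => t.1 == w) bs'
              simp only [dropRun]
              simp at hlen
              omega)
            (ha.of_cons.sublist (List.dropWhile_sublist _))
            (hb.of_cons.sublist (List.dropWhile_sublist _))]
        rw [hcand, List.foldl_append, maxdiff, hMax, hMin]
        congr 1
        omega

theorem count_eq_alt (fw lw : List Int) (D : Int) (_h : Pre_count fw lw D) :
    count fw lw D = count_alt fw lw D := by
  unfold count count_alt
  by_cases heq : fw = lw
  · simp [heq]
  · simp only [if_neg heq]
    have hA := outerA_eq lw fw 0 0
    have hB := mergeB_eq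
      ((PySem.List.sorted (enumI 0 fw) (fun t => t.1)).length
        + (PySem.List.sorted (enumI 0 lw) (fun t => t.1)).length)
      (PySem.List.sorted (enumI 0 fw) (fun t => t.1))
      (PySem.List.sorted (enumI 0 lw) (fun t => t.1)) 0 (le_refl _)
      (PySem.List.sorted_pairwise _ _) (PySem.List.sorted_pairwise _ _)
    have hpermA := PySem.List.sorted_perm (enumI 0 fw) (fun t : Int × Int => t.1) false
    have hpermB := PySem.List.sorted_perm (enumI 0 lw) (fun t : Int × Int => t.1) false
    have hc : (cand (PySem.List.sorted (enumI 0 fw) (fun t => t.1))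
                    (PySem.List.sorted (enumI 0 lw) (fun t => t.1))).Perm
              (cand (enumI 0 fw) (enumI 0 lw)) :=
      List.Perm.flatMap hpermA (fun a _ => List.Perm.filterMap (fmatch a) hpermB)
    have hfold : List.foldl max (0 : Int)
          (cand (PySem.List.sorted (enumI 0 fw) (fun t => t.1))
                (PySem.List.sorted (enumI 0 lw) (fun t => t.1)))
        = List.foldl max 0 (cand (enumI 0 fw) (enumI 0 lw)) :=
      @List.Perm.foldl_eq Int Int max _ _ ⟨fun a b c => max_right_comm a b c⟩ hc 0
    rw [hA, hB, hfold]

-- ===== VERDICT (by name: the statement is the Claim_ definition above) =====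
theorem count_spec : Claim_equal_count := by
  intro fw lw D _ hpre
  unfold Spec_count
  exact count_eq_alt fw lw D hpre
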